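-- pv_equiv track=rewrite | github.com/siriusnen-commits/archmind-mvp | src/archmind/project_analysis.py | _select_next_action
-- ===== SOURCE A (Python) =====
-- SUGGESTION_PRIORITY_RANK = {"high": 3, "medium": 2, "low": 1, "none": 0}
--
-- ESSENTIAL_FIELDS = {"title", "name", "content"}
--
-- USEFUL_DOMAIN_FIELDS = {"description", "status", "priority"}
--
-- def _suggestion_priority(row: dict[str, str] | None) -> str:
--     item = row if isinstance(row, dict) else {}
--     command = str(item.get("command") or "").strip()
--     kind = str(item.get("kind") or "").strip().lower()
--     message = str(item.get("message") or "").strip().lower()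
--
--     if not command and (kind == "none" or message == "no immediate suggestions."):
--         return "none"
--
--     if command.startswith("/add_entity ") or command.startswith("/add_api ") or command.startswith("/add_page "):
--         return "high"
--     if command.startswith("/implement_page "):
--         return "high"
--     if command.startswith("/add_field "):
--         field_name = _extract_add_field_name(command)
--         if field_name in ESSENTIAL_FIELDS:
--             return "high"
--         if field_name in USEFUL_DOMAIN_FIELDS:
--             return "medium"
--         return "low"
--     if kind in {
--         "missing_crud_api",
--         "missing_page",
--         "placeholder_page",
--         "missing_entity",
--         "relation_page_behavior",
--         "relation_scoped_api",
--         "relation_placeholder_page",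
--     }:
--         return "high"
--     return "medium"
--
-- def _extract_add_field_name(command: str) -> str:
--     text = str(command or "").strip()
--     if not text.startswith("/add_field "):
--         return ""
--     parts = text.split()
--     if len(parts) < 3:
--         return ""
--     expr = str(parts[2] or "").strip()
--     if not expr:
--         return ""
--     return expr.split(":", 1)[0].strip().lower()
--
-- def _select_next_action(suggestions: list[dict[str, str]]) -> dict[str, str]:
--     best_without_command: dict[str, str] | None = None
--     for row in suggestions:
--         priority = _suggestion_priority(row)
--         command = str(row.get("command") or "").strip()
--         if SUGGESTION_PRIORITY_RANK.get(priority, 0) >= SUGGESTION_PRIORITY_RANK["medium"]: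
--             if command:
--                 return {
--                     "kind": str(row.get("kind") or "none"),
--                     "message": str(row.get("message") or ""),
--                     "command": command,
--                 }
--             if best_without_command is None:
--                 best_without_command = {
--                     "kind": str(row.get("kind") or "none"),
--                     "message": str(row.get("message") or ""),
--                     "command": "",
--                 }
--     if best_without_command is not None:
--         return best_without_command
--     for row in suggestions:
--         if str(row.get("kind") or "").strip().lower() == "none":
--             return {
--                 "kind": str(row.get("kind") or "none"),
--                 "message": str(row.get("message") or ""),
--                 "command": str(row.get("command") or ""),
--             }
--     return {"kind": "none", "message": "No immediate suggestions.", "command": ""}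
-- ===== SOURCE B (Python) =====
-- # B: classifies each row once into a numeric category (0 actionable+command,
-- # 1 actionable pending, 2 kind 'none', None irrelevant) and scans the list in
-- # REVERSE with one (category, row) slot overwritten on category <=, so the
-- # earliest row of the best category survives; one final formatting step replaces
-- # A's forward staged passes with early returns.
-- SUGGESTION_PRIORITY_RANK = {"high": 3, "medium": 2, "low": 1, "none": 0}
--
-- ESSENTIAL_FIELDS = {"title", "name", "content"}
--
-- USEFUL_DOMAIN_FIELDS = {"description", "status", "priority"}
--
--
-- def _extract_add_field_name(command: str) -> str:
--     text = str(command or "").strip()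
--     if not text.startswith("/add_field "):
--         return ""
--     parts = text.split()
--     if len(parts) < 3:
--         return ""
--     expr = str(parts[2] or "").strip()
--     if not expr:
--         return ""
--     return expr.split(":", 1)[0].strip().lower()
--
--
-- def _suggestion_priority(row) -> str:
--     item = row if isinstance(row, dict) else {}
--     command = str(item.get("command") or "").strip()
--     kind = str(item.get("kind") or "").strip().lower()
--     message = str(item.get("message") or "").strip().lower()
--
--     if not command and (kind == "none" or message == "no immediate suggestions."):
--         return "none"
--
--     if command.startswith("/add_entity ") or command.startswith("/add_api ") or command.startswith("/add_page "):
--         return "high"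
--     if command.startswith("/implement_page "):
--         return "high"
--     if command.startswith("/add_field "):
--         field_name = _extract_add_field_name(command)
--         if field_name in ESSENTIAL_FIELDS:
--             return "high"
--         if field_name in USEFUL_DOMAIN_FIELDS:
--             return "medium"
--         return "low"
--     if kind in {
--         "missing_crud_api",
--         "missing_page",
--         "placeholder_page",
--         "missing_entity",
--         "relation_page_behavior",
--         "relation_scoped_api",
--         "relation_placeholder_page",
--     }:
--         return "high"
--     return "medium"
--
--
-- def _category(row):
--     """0: actionable row with a command; 1: actionable row without one;
--     2: row whose kind is 'none'; None: plays no role in the selection."""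
--     if SUGGESTION_PRIORITY_RANK.get(_suggestion_priority(row), 0) >= SUGGESTION_PRIORITY_RANK["medium"]:
--         return 0 if str(row.get("command") or "").strip() else 1
--     if str(row.get("kind") or "").strip().lower() == "none":
--         return 2
--     return None
--
--
-- def _select_next_action(suggestions):
--     best = None  # (category, row); scanned back-to-front, earlier row wins ties
--     for row in reversed(suggestions):
--         cat = _category(row)
--         if cat is not None and (best is None or cat <= best[0]):
--             best = (cat, row)
--     if best is None:
--         return {"kind": "none", "message": "No immediate suggestions.", "command": ""}
--     cat, row = best
--     if cat == 0:
--         command = str(row.get("command") or "").strip()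
--     elif cat == 1:
--         command = ""
--     else:
--         command = str(row.get("command") or "")
--     return {
--         "kind": str(row.get("kind") or "none"),
--         "message": str(row.get("message") or ""),
--         "command": command,
--     }
-- ===== Notes on version B (the rewrite author's own statement) =====
-- stated objective: alternative
-- what changed: Replaces A's two forward staged passes with early returns by a unified per-row numeric categorization (0 command / 1 pending / 2 kind-none / None) and a single reverse traversal keeping one (category,row) slot overwritten on category <=, formatted once at the end.
import Mathlib
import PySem

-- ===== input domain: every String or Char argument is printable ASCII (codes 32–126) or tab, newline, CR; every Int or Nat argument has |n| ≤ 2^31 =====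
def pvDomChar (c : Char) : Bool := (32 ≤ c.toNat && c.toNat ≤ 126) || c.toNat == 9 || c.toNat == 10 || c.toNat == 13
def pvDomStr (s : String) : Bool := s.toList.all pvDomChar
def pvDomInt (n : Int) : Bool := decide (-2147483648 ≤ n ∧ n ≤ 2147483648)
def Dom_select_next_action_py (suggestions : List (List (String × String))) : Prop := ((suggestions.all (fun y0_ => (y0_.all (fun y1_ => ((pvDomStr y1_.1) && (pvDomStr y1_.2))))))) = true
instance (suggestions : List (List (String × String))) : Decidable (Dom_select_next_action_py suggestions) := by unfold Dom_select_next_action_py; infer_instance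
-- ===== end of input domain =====

-- B categorizes each row once and scans the list in reverse with a single
-- (category,row) slot instead of A's forward staged passes; same return value.

-- ===== PORT A =====
-- shared module helpers (used verbatim by both Python versions)

-- str(row.get(k) or d): a missing key or an empty-string value both yield d
def pyGetOr (row : List (String × String)) (k d : String) : String :=
  match (PySem.Dict.mk row).get? k with
  | none => d
  | some v => if v = "" then d else v

def SUGGESTION_PRIORITY_RANK : PySem.Dict String Int :=
  PySem.Dict.ofList [("high", 3), ("medium", 2), ("low", 1), ("none", 0)]

def ESSENTIAL_FIELDS : List String := ["title", "name", "content"]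

def USEFUL_DOMAIN_FIELDS : List String := ["description", "status", "priority"]

def extract_add_field_name (command : String) : String :=
  let text := PySem.Str.strip (if command = "" then "" else command)
  if ¬ PySem.Str.startswith text "/add_field " then ""
  else
    let parts := PySem.Str.split₀ text
    if parts.length < 3 then ""
    else
      let p2 := PySem.List.pyGetD parts 2 ""
      let expr := PySem.Str.strip (if p2 = "" then "" else p2)
      if expr = "" then ""
      else
        match PySem.Str.splitMax? expr ":" 1 with
        | some (h :: _) => PySem.Str.lower (PySem.Str.strip h)
        | _ => ""   -- unreachable: split with non-empty sep returns a non-empty list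

def suggestion_priority (row : List (String × String)) : String :=
  let command := PySem.Str.strip (pyGetOr row "command" "")
  let kind := PySem.Str.lower (PySem.Str.strip (pyGetOr row "kind" ""))
  let message := PySem.Str.lower (PySem.Str.strip (pyGetOr row "message" ""))
  if command = "" ∧ (kind = "none" ∨ message = "no immediate suggestions.") then "none"
  else if PySem.Str.startswith command "/add_entity " || PySem.Str.startswith command "/add_api " || PySem.Str.startswith command "/add_page " then "high"
  else if PySem.Str.startswith command "/implement_page " then "high"
  else if PySem.Str.startswith command "/add_field " then
    let field_name := extract_add_field_name command
    if field_name ∈ ESSENTIAL_FIELDS then "high"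
    else if field_name ∈ USEFUL_DOMAIN_FIELDS then "medium"
    else "low"
  else if kind ∈ ["missing_crud_api", "missing_page", "placeholder_page", "missing_entity",
                  "relation_page_behavior", "relation_scoped_api", "relation_placeholder_page"] then "high"
  else "medium"

-- the result dict {"kind": str(row.get("kind") or "none"), "message": str(row.get("message") or ""), "command": command}
def fmt_action (row : List (String × String)) (command : String) : List (String × String) :=
  [("kind", pyGetOr row "kind" "none"), ("message", pyGetOr row "message" ""), ("command", command)]

def default_action : List (String × String) :=
  [("kind", "none"), ("message", "No immediate suggestions."), ("command", "")]

-- A's first loop: early return (Sum.inl) or the final best_without_command (Sum.inr)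
def selA_loop1 : List (List (String × String)) → Option (List (String × String)) →
    (List (String × String)) ⊕ (Option (List (String × String)))
  | [], best => Sum.inr best
  | row :: rest, best =>
    let priority := suggestion_priority row
    let command := PySem.Str.strip (pyGetOr row "command" "")
    if SUGGESTION_PRIORITY_RANK.getD priority 0 ≥ SUGGESTION_PRIORITY_RANK.getD "medium" 0 then
      if command ≠ "" then Sum.inl (fmt_action row command)
      else selA_loop1 rest (match best with
        | none => some (fmt_action row "")
        | some b => some b)
    else selA_loop1 rest best

-- A's second loop over the whole list
def selA_loop2 : List (List (String × String)) → List (String × String)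
  | [] => default_action
  | row :: rest =>
    if PySem.Str.lower (PySem.Str.strip (pyGetOr row "kind" "")) = "none" then
      fmt_action row (pyGetOr row "command" "")
    else selA_loop2 rest

def select_next_action_py (suggestions : List (List (String × String))) : List (String × String) :=
  match selA_loop1 suggestions none with
  | Sum.inl r => r
  | Sum.inr (some b) => b
  | Sum.inr none => selA_loop2 suggestions

-- ===== PORT B =====
-- B's per-row categorization (_category): 0 actionable+command, 1 actionable
-- pending, 2 kind 'none', none irrelevant
def selB_cat (row : List (String × String)) : Option Int :=
  if SUGGESTION_PRIORITY_RANK.getD (suggestion_priority row) 0 ≥ SUGGESTION_PRIORITY_RANK.getD "medium" 0 then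
    some (if PySem.Str.strip (pyGetOr row "command" "") ≠ "" then 0 else 1)
  else if PySem.Str.lower (PySem.Str.strip (pyGetOr row "kind" "")) = "none" then some 2
  else none

-- one step of B's reverse scan: overwrite the slot when cat ≤ current category
-- (the category is computed first, as in the Python loop body)
def selB_upd (cat? : Option Int) (best : Option (Int × List (String × String)))
    (row : List (String × String)) : Option (Int × List (String × String)) :=
  match cat? with
  | none => best
  | some cat =>
    match best with
    | none => some (cat, row)
    | some (bc, br) => if cat ≤ bc then some (cat, row) else some (bc, br)

def select_next_action_py_alt (suggestions : List (List (String × String))) : List (String × String) :=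
  match suggestions.reverse.foldl (fun best row => selB_upd (selB_cat row) best row) none with
  | none => default_action
  | some (cat, row) =>
    let command :=
      if cat = 0 then PySem.Str.strip (pyGetOr row "command" "")
      else if cat = 1 then ""
      else pyGetOr row "command" ""
    fmt_action row command

-- ===== PRECONDITION & SPEC =====
def Spec_select_next_action_py (suggestions : List (List (String × String))) (out : List (String × String)) : Prop := out = select_next_action_py_alt suggestions
instance (suggestions : List (List (String × String))) (out : List (String × String)) : Decidable (Spec_select_next_action_py suggestions out) := by unfold Spec_select_next_action_py; infer_instance

-- ===== CLAIM (what is proved, stated in full; the proofs are below) =====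
def Claim_equal_select_next_action_py : Prop := ∀ (suggestions : List (List (String × String))), Dom_select_next_action_py suggestions → Spec_select_next_action_py suggestions (select_next_action_py suggestions)

-- ===== LEMMAS AND PROOFS =====

-- the row predicates both programs branch on
def pIsMed (row : List (String × String)) : Bool :=
  SUGGESTION_PRIORITY_RANK.getD (suggestion_priority row) 0 ≥ SUGGESTION_PRIORITY_RANK.getD "medium" 0
def cmdOf (row : List (String × String)) : String := PySem.Str.strip (pyGetOr row "command" "")
def pIsCmd (row : List (String × String)) : Bool := pIsMed row && !(cmdOf row == "")
def pIsPend (row : List (String × String)) : Bool := pIsMed row && (cmdOf row == "")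
def pIsNoneK (row : List (String × String)) : Bool :=
  PySem.Str.lower (PySem.Str.strip (pyGetOr row "kind" "")) == "none"
def pIsNone2 (row : List (String × String)) : Bool := !pIsMed row && pIsNoneK row

lemma selA_loop1_some (rows : List (List (String × String))) (b : List (String × String)) :
    selA_loop1 rows (some b) =
      match rows.find? pIsCmd with
      | some r => Sum.inl (fmt_action r (cmdOf r))
      | none => Sum.inr (some b) := by
  induction rows with
  | nil => rfl
  | cons row rest ih =>
    by_cases hm : (SUGGESTION_PRIORITY_RANK.getD (suggestion_priority row) 0 ≥ SUGGESTION_PRIORITY_RANK.getD "medium" 0)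
    · by_cases hc : PySem.Str.strip (pyGetOr row "command" "") = ""
      · have h1 : pIsCmd row = false := by simp [pIsCmd, pIsMed, cmdOf, hc]
        simp [selA_loop1, List.find?, hm, hc, h1, ih]
      · have h1 : pIsCmd row = true := by simp [pIsCmd, pIsMed, cmdOf, hm, hc]
        simp [selA_loop1, List.find?, hm, hc, h1, cmdOf]
    · have h1 : pIsCmd row = false := by simp [pIsCmd, pIsMed, hm]
      simp [selA_loop1, List.find?, hm, h1, ih]

lemma selA_loop1_none (rows : List (List (String × String))) :
    selA_loop1 rows none =
      match rows.find? pIsCmd with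
      | some r => Sum.inl (fmt_action r (cmdOf r))
      | none => Sum.inr ((rows.find? pIsPend).map (fun r => fmt_action r "")) := by
  induction rows with
  | nil => rfl
  | cons row rest ih =>
    by_cases hm : (SUGGESTION_PRIORITY_RANK.getD (suggestion_priority row) 0 ≥ SUGGESTION_PRIORITY_RANK.getD "medium" 0)
    · by_cases hc : PySem.Str.strip (pyGetOr row "command" "") = ""
      · have h1 : pIsCmd row = false := by simp [pIsCmd, pIsMed, cmdOf, hc]
        have h2 : pIsPend row = true := by simp [pIsPend, pIsMed, cmdOf, hm, hc]
        simp [selA_loop1, List.find?, hm, hc, h1, h2, selA_loop1_some]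
      · have h1 : pIsCmd row = true := by simp [pIsCmd, pIsMed, cmdOf, hm, hc]
        simp [selA_loop1, List.find?, hm, hc, h1, cmdOf]
    · have h1 : pIsCmd row = false := by simp [pIsCmd, pIsMed, hm]
      have h2 : pIsPend row = false := by simp [pIsPend, pIsMed, hm]
      simp [selA_loop1, List.find?, hm, h1, h2, ih]

lemma selA_loop2_find (rows : List (List (String × String))) :
    selA_loop2 rows =
      match rows.find? pIsNoneK with
      | some r => fmt_action r (pyGetOr r "command" "")
      | none => default_action := by
  induction rows with
  | nil => rfl
  | cons row rest ih =>
    by_cases hk : PySem.Str.lower (PySem.Str.strip (pyGetOr row "kind" "")) = "none"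
    · have h3 : pIsNoneK row = true := by simp [pIsNoneK, hk]
      simp [selA_loop2, List.find?, h3, hk]
    · have h3 : pIsNoneK row = false := by simp [pIsNoneK, hk]
      simp [selA_loop2, List.find?, h3, hk, ih]

-- if no row is actionable, the first kind-'none' row is the first category-2 row
lemma find_noneK_eq_none2 (rows : List (List (String × String)))
    (h : ∀ r ∈ rows, pIsMed r = false) :
    rows.find? pIsNoneK = rows.find? pIsNone2 := by
  induction rows with
  | nil => rw [List.find?_nil, List.find?_nil]
  | cons row rest ih =>
    have hm := h row (List.mem_cons_self)
    have h2 : pIsNone2 row = pIsNoneK row := by simp [pIsNone2, hm]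
    have ih' := ih (fun r hr => h r (List.mem_cons_of_mem _ hr))
    cases hk : pIsNoneK row with
    | true =>
      rw [List.find?_cons_of_pos (p := pIsNoneK) hk,
          List.find?_cons_of_pos (p := pIsNone2) (by rw [h2, hk])]
    | false =>
      rw [List.find?_cons_of_neg (p := pIsNoneK) (by simp [hk]),
          List.find?_cons_of_neg (p := pIsNone2) (by simp [h2, hk]), ih']

-- B's categorization, characterized by the three row predicates
lemma cat_of (row : List (String × String)) :
    selB_cat row =
      if pIsCmd row then some 0
      else if pIsPend row then some 1
      else if pIsNone2 row then some 2
      else none := by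
  by_cases hm : (SUGGESTION_PRIORITY_RANK.getD (suggestion_priority row) 0 ≥ SUGGESTION_PRIORITY_RANK.getD "medium" 0)
  · by_cases hc : PySem.Str.strip (pyGetOr row "command" "") = ""
    · have h1 : pIsCmd row = false := by simp [pIsCmd, pIsMed, cmdOf, hc]
      have h2 : pIsPend row = true := by simp [pIsPend, pIsMed, cmdOf, hm, hc]
      simp [selB_cat, hm, hc, h1, h2]
    · have h1 : pIsCmd row = true := by simp [pIsCmd, pIsMed, cmdOf, hm, hc]
      simp [selB_cat, hm, hc, h1]
  · have h1 : pIsCmd row = false := by simp [pIsCmd, pIsMed, hm]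
    have h2 : pIsPend row = false := by simp [pIsPend, pIsMed, hm]
    by_cases hk : PySem.Str.lower (PySem.Str.strip (pyGetOr row "kind" "")) = "none"
    · have h3 : pIsNone2 row = true := by simp [pIsNone2, pIsNoneK, pIsMed, hm, hk]
      simp [selB_cat, hm, hk, h1, h2, h3]
    · have h3 : pIsNone2 row = false := by simp [pIsNone2, pIsNoneK, hk]
      simp [selB_cat, hm, hk, h1, h2, h3]

-- B's reverse scan, read as a foldr, computes the best (category, first row)
lemma selB_fold (rows : List (List (String × String))) :
    rows.foldr (fun row best => selB_upd (selB_cat row) best row) none =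
      match rows.find? pIsCmd with
      | some r => some ((0 : Int), r)
      | none =>
        match rows.find? pIsPend with
        | some r => some ((1 : Int), r)
        | none => (rows.find? pIsNone2).map (fun r => ((2 : Int), r)) := by
  induction rows with
  | nil => simp [List.find?_nil]
  | cons row rest ih =>
    rw [List.foldr_cons, ih]
    cases h1 : pIsCmd row with
    | true =>
      have hc : selB_cat row = some 0 := by rw [cat_of, h1]; simp
      rw [List.find?_cons_of_pos (p := pIsCmd) h1, hc]
      cases rest.find? pIsCmd <;> cases rest.find? pIsPend <;>
        cases rest.find? pIsNone2 <;> simp [selB_upd]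
    | false =>
      rw [List.find?_cons_of_neg (p := pIsCmd) (by simp [h1])]
      cases h2 : pIsPend row with
      | true =>
        have hc : selB_cat row = some 1 := by rw [cat_of, h1, h2]; simp
        rw [List.find?_cons_of_pos (p := pIsPend) h2, hc]
        cases rest.find? pIsCmd <;> cases rest.find? pIsPend <;>
          cases rest.find? pIsNone2 <;> simp [selB_upd]
      | false =>
        rw [List.find?_cons_of_neg (p := pIsPend) (by simp [h2])]
        cases h3 : pIsNone2 row with
        | true =>
          have hc : selB_cat row = some 2 := by rw [cat_of, h1, h2, h3]; simp
          rw [List.find?_cons_of_pos (p := pIsNone2) h3, hc]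
          cases rest.find? pIsCmd <;> cases rest.find? pIsPend <;>
            cases rest.find? pIsNone2 <;> simp [selB_upd]
        | false =>
          have hc : selB_cat row = none := by rw [cat_of, h1, h2, h3]; simp
          rw [List.find?_cons_of_neg (p := pIsNone2) (by simp [h3]), hc]
          cases rest.find? pIsCmd <;> cases rest.find? pIsPend <;>
            cases rest.find? pIsNone2 <;> simp [selB_upd]

-- ===== VERDICT (by name: the statement is the Claim_ definition above) =====
theorem select_next_action_py_spec : Claim_equal_select_next_action_py := by
  intro s _
  unfold Spec_select_next_action_py select_next_action_py select_next_action_py_alt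
  rw [List.foldl_reverse, selB_fold, selA_loop1_none]
  cases hC : s.find? pIsCmd with
  | some r => simp [cmdOf]
  | none =>
    cases hP : s.find? pIsPend with
    | some r => simp
    | none =>
      have hmed : ∀ r ∈ s, pIsMed r = false := by
        intro r hr
        by_contra h
        have hm : pIsMed r = true := by revert h; cases pIsMed r <;> simp
        have hCn := List.find?_eq_none.mp hC r hr
        have hPn := List.find?_eq_none.mp hP r hr
        by_cases hc : cmdOf r = ""
        · exact hPn (by simp [pIsPend, hm, hc])
        · exact hCn (by simp [pIsCmd, hm, hc])
      rw [selA_loop2_find, find_noneK_eq_none2 s hmed]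
      cases hN : s.find? pIsNone2 with
      | some r =>
        simp only [Option.map_some]
        norm_num
      | none => simp
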